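-- pv_equiv track=rewrite | github.com/CSE-9124/CSE-AP | Final-AP/Easy/Sepatu di Toko.py | Banyak_Jumlah_Pasang
-- ===== SOURCE A (Python) =====
-- def Banyak_Jumlah_Pasang(N, ListOfN):
--     Pasang = 0
--     Banyak_Ukuran = {}
--
--     for Size in ListOfN:
--         if Size in Banyak_Ukuran:
--             Banyak_Ukuran[Size] += 1
--         else:
--             Banyak_Ukuran[Size] = 1
--
--     for count in Banyak_Ukuran.values():
--         Pasang += count // 2
--
--     return Pasang
-- ===== SOURCE B (Python) =====
-- def Banyak_Jumlah_Pasang(N, ListOfN):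
--     Pasang = 0
--     run = 0
--     prev = None
--     for Size in sorted(ListOfN):
--         if run and Size == prev:
--             run += 1
--         else:
--             Pasang += run // 2
--             run = 1
--             prev = Size
--     return Pasang + run // 2
-- ===== Notes on version B (the rewrite author's own statement) =====
-- stated objective: alternative
-- what changed: Replaces the hash-map size counter plus a second loop over its values by sorting a copy of the list and doing one run-length pass, adding run//2 each time the value changes; trades the dict for sorting.
import Mathlib
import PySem

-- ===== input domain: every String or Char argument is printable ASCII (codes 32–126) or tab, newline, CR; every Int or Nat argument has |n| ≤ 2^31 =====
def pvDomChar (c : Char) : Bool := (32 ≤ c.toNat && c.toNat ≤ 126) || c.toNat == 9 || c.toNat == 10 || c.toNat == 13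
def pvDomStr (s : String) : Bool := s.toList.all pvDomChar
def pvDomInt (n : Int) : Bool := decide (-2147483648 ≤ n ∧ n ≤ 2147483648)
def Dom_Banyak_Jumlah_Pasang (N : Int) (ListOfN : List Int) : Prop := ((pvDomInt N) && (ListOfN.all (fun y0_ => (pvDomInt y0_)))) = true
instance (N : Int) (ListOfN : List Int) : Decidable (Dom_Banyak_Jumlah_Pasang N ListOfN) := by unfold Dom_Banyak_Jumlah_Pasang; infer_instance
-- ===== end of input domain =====

-- B sorts a copy of the list and counts pairs by one run-length pass instead of A's hash-map counter (alternative algorithm, same result).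


-- ===== PORT A =====
def Banyak_Jumlah_Pasang (N : Int) (ListOfN : List Int) : Int :=
  let banyakUkuran : PySem.Dict Int Int :=
    ListOfN.foldl
      (fun d size =>
        if d.contains size then d.insert size (d.getD size 0 + 1)
        else d.insert size 1)
      PySem.Dict.empty
  banyakUkuran.values.foldl (fun pasang count => pasang + PySem.Int.floordiv count 2) 0

-- ===== PORT B =====
-- loop body of B: state (Pasang, run, prev); 'if run and Size == prev'
def pvStepB (st : Int × Int × Option Int) (size : Int) : Int × Int × Option Int :=
  if st.2.1 ≠ 0 ∧ st.2.2 = some size then (st.1, st.2.1 + 1, st.2.2)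
  else (st.1 + PySem.Int.floordiv st.2.1 2, 1, some size)

def Banyak_Jumlah_Pasang_alt (N : Int) (ListOfN : List Int) : Int :=
  let st := (PySem.List.sorted ListOfN (fun x => x)).foldl pvStepB (0, 0, none)
  st.1 + PySem.Int.floordiv st.2.1 2

-- ===== PRECONDITION & SPEC =====
def Spec_Banyak_Jumlah_Pasang (N : Int) (ListOfN : List Int) (out : Int) : Prop := out = Banyak_Jumlah_Pasang_alt N ListOfN
instance (N : Int) (ListOfN : List Int) (out : Int) : Decidable (Spec_Banyak_Jumlah_Pasang N ListOfN out) := by unfold Spec_Banyak_Jumlah_Pasang; infer_instance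

-- ===== CLAIM (what is proved, stated in full; the proofs are below) =====
def Claim_equal_Banyak_Jumlah_Pasang : Prop := ∀ (N : Int) (ListOfN : List Int), Dom_Banyak_Jumlah_Pasang N ListOfN → Spec_Banyak_Jumlah_Pasang N ListOfN (Banyak_Jumlah_Pasang N ListOfN)

-- ===== LEMMAS AND PROOFS =====

-- common value both programs compute: sum of count(v) // 2 over the distinct sizes
def pvC (xs : List Int) : Int :=
  ((PySem.List.dedup xs).map (fun v => PySem.Int.floordiv (xs.count v : Int) 2)).sum

theorem pvC_perm {xs ys : List Int} (h : xs.Perm ys) : pvC xs = pvC ys := by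
  have hd : (PySem.List.dedup xs).Perm (PySem.List.dedup ys) := by
    rw [List.perm_ext_iff_of_nodup (PySem.List.nodup_dedup xs) (PySem.List.nodup_dedup ys)]
    intro a
    simp [h.mem_iff]
  unfold pvC
  calc ((PySem.List.dedup xs).map (fun v => PySem.Int.floordiv (xs.count v : Int) 2)).sum
      = ((PySem.List.dedup xs).map (fun v => PySem.Int.floordiv (ys.count v : Int) 2)).sum := by
        congr 1
        exact List.map_congr_left (fun a _ => by rw [h.count_eq])
    _ = ((PySem.List.dedup ys).map (fun v => PySem.Int.floordiv (ys.count v : Int) 2)).sum :=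
        (hd.map _).sum_eq

theorem pvC_cons (y : Int) (t : List Int) :
    pvC (y :: t)
      = PySem.Int.floordiv (((y :: t).count y : Int)) 2 + pvC (t.filter (fun z => z != y)) := by
  have hnd2 : (y :: PySem.List.dedup (t.filter (fun z => z != y))).Nodup := by
    refine List.nodup_cons.2 ⟨?_, PySem.List.nodup_dedup _⟩
    intro hmem
    rw [PySem.List.mem_dedup] at hmem
    have := List.of_mem_filter hmem
    simp at this
  have hperm : (PySem.List.dedup (y :: t)).Perm
      (y :: PySem.List.dedup (t.filter (fun z => z != y))) := by
    rw [List.perm_ext_iff_of_nodup (PySem.List.nodup_dedup _) hnd2]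
    intro a
    simp only [PySem.List.mem_dedup, List.mem_cons, List.mem_filter, bne_iff_ne, ne_eq]
    constructor
    · rintro (rfl | ha)
      · exact Or.inl rfl
      · by_cases hay : a = y
        · exact Or.inl hay
        · exact Or.inr ⟨ha, hay⟩
    · rintro (rfl | ⟨ha, _⟩)
      · exact Or.inl rfl
      · exact Or.inr ha
  unfold pvC
  rw [(hperm.map (fun v => PySem.Int.floordiv (((y :: t).count v : Int)) 2)).sum_eq]
  simp only [List.map_cons, List.sum_cons]
  congr 1
  congr 1
  apply List.map_congr_left
  intro a ha
  rw [PySem.List.mem_dedup] at ha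
  have hane := List.of_mem_filter ha
  have haney : a ≠ y := by simpa using hane
  rw [List.count_filter (p := fun z => z != y) (a := a) hane]
  simp [Ne.symm haney]

-- the run-length loop on a sorted tail, with an open run of length n on value a
theorem pvRunLoop (ys : List Int) (hs : List.Pairwise (· ≤ ·) ys) :
    ∀ (p n a : Int), 0 < n → (∀ y ∈ ys, a ≤ y) →
      (ys.foldl pvStepB (p, n, some a)).1
          + PySem.Int.floordiv (ys.foldl pvStepB (p, n, some a)).2.1 2
        = p + PySem.Int.floordiv (n + (ys.count a : Int)) 2
            + pvC (ys.filter (fun z => z != a)) := by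
  induction ys with
  | nil =>
    intro p n a _ _
    simp [pvC]
  | cons y t ih =>
    intro p n a hn hb
    rcases List.pairwise_cons.1 hs with ⟨h1, h2⟩
    by_cases hya : y = a
    · subst hya
      have hstep : pvStepB (p, n, some y) y = (p, n + 1, some y) := by
        unfold pvStepB
        rw [if_pos ⟨(by show n ≠ 0; omega), rfl⟩]
      rw [List.foldl_cons, hstep, ih h2 p (n + 1) y (by omega) h1]
      have hcnt : ((y :: t).count y : Int) = (t.count y : Int) + 1 := by
        rw [List.count_cons_self]; push_cast; omega
      have hfil : (y :: t).filter (fun z => z != y) = t.filter (fun z => z != y) := by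
        simp
      rw [hcnt, hfil,
        show n + 1 + ((t.count y : Int)) = n + ((t.count y : Int) + 1) from by omega]
    · have hstep : pvStepB (p, n, some a) y
          = (p + PySem.Int.floordiv n 2, 1, some y) := by
        unfold pvStepB
        rw [if_neg (fun hcc => hya (Option.some.inj hcc.2).symm)]
      have hay : a < y := lt_of_le_of_ne (hb y (List.mem_cons_self)) (fun h => hya h.symm)
      rw [List.foldl_cons, hstep, ih h2 _ 1 y (by omega) h1]
      have hnotmem : a ∉ y :: t := by
        intro hm
        rcases List.mem_cons.1 hm with rfl | hm'
        · exact absurd rfl (ne_of_gt hay)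
        · exact absurd rfl (ne_of_gt (lt_of_lt_of_le hay (h1 a hm')))
      have hcnt : ((y :: t).count a : Int) = 0 := by
        rw [List.count_eq_zero.2 hnotmem]; rfl
      have hfil : (y :: t).filter (fun z => z != a) = y :: t := by
        rw [List.filter_eq_self]
        intro b hbm
        simp only [bne_iff_ne, ne_eq]
        intro hba
        subst hba
        exact hnotmem hbm
      rw [hcnt, hfil, pvC_cons y t]
      have hc1 : ((y :: t).count y : Int) = 1 + (t.count y : Int) := by
        rw [List.count_cons_self]; push_cast; omega
      rw [hc1, add_zero]
      ring
  
theorem pvB_eq_C (N : Int) (xs : List Int) : Banyak_Jumlah_Pasang_alt N xs = pvC xs := by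
  have hperm : (PySem.List.sorted xs (fun x => x)).Perm xs :=
    PySem.List.sorted_perm xs (fun x => x) false
  rw [show pvC xs = pvC (PySem.List.sorted xs (fun x => x)) from (pvC_perm hperm).symm]
  have hpw : List.Pairwise (· ≤ ·) (PySem.List.sorted xs (fun x => x)) :=
    PySem.List.sorted_pairwise xs (fun x => x)
  unfold Banyak_Jumlah_Pasang_alt
  cases hsrt : PySem.List.sorted xs (fun x => x) with
  | nil => simp [pvC]
  | cons y t =>
    rw [hsrt] at hpw
    rcases List.pairwise_cons.1 hpw with ⟨h1, _⟩
    have hstep : pvStepB (0, 0, none) y = (0, 1, some y) := by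
      unfold pvStepB
      rw [if_neg (fun hcc => hcc.1 rfl)]
      norm_num
    simp only [List.foldl_cons, hstep]
    rw [pvRunLoop t (List.pairwise_cons.1 hpw).2 0 1 y (by omega) h1]
    rw [pvC_cons y t]
    have hc1 : ((y :: t).count y : Int) = 1 + (t.count y : Int) := by
      rw [List.count_cons_self]; push_cast; omega
    rw [hc1]
    omega

-- A's branching update is, pointwise, the unconditional counter update.
theorem pvBranch_eq (d : PySem.Dict Int Int) (x : Int) :
    (if d.contains x then d.insert x (d.getD x 0 + 1) else d.insert x 1)
      = d.insert x (d.getD x 0 + 1) := by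
  cases h : d.contains x with
  | true => simp
  | false => rw [if_neg (by simp), PySem.Dict.getD_of_not_contains d 0 h]; norm_num

theorem pvA_eq_C (N : Int) (xs : List Int) : Banyak_Jumlah_Pasang N xs = pvC xs := by
  unfold Banyak_Jumlah_Pasang
  have hdict : xs.foldl
      (fun d size =>
        if d.contains size then d.insert size (d.getD size 0 + 1)
        else d.insert size 1)
      PySem.Dict.empty = PySem.Dict.counter xs := by
    rw [PySem.List.foldl_congr_mem xs _ (fun d x => d.insert x (d.getD x 0 + 1)) _
         (fun acc x _ => pvBranch_eq acc x)]
    exact PySem.Dict.foldl_insert_getD_add_one_eq_counter xs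
  rw [hdict, PySem.List.foldl_add (g := fun c => PySem.Int.floordiv c 2)]
  simp [pvC, PySem.Dict.values, PySem.Dict.items_counter, List.map_map, Function.comp_def]

-- ===== VERDICT (by name: the statement is the Claim_ definition above) =====
theorem Banyak_Jumlah_Pasang_spec : Claim_equal_Banyak_Jumlah_Pasang := by
  intro N xs _
  unfold Spec_Banyak_Jumlah_Pasang
  rw [pvA_eq_C N xs, pvB_eq_C N xs]
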